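-- pv_equiv track=rewrite | github.com/gvarun20/TDDD95 | Problem solving session 1/alicedigital.py | max_weight_subarray
-- ===== SOURCE A (Python) =====
-- from collections import deque
--
-- def max_weight_subarray(n, m, array):
--     max_weight = -1
--     left = 0
--     count_m = 0
--     current_weight = 0
--     min_queue = deque()  # Stores indices to track the min element efficiently
--
--     for right in range(n):
--         # Update count_m when m appears
--         if array[right] == m:
--             count_m += 1
--
--         # Add use to the current element to the sum
--         current_weight += array[right]
--
--         # keep the this to min_queue in increasing order
--         while min_queue and array[min_queue[-1]] > array[right]:
--             min_queue.pop()
--         min_queue.append(right)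
--
--         # make this less window if needed
--         while count_m > 1 or (count_m == 1 and array[min_queue[0]] < m):
--             if array[left] == m:
--                 count_m -= 1
--             current_weight -= array[left]
--
--             # Remove left element from min_queue if it goes out of window
--             if min_queue and min_queue[0] == left:
--                 min_queue.popleft()
--
--             left += 1
--
--         # Check if this is the valid window
--         if count_m == 1 and array[min_queue[0]] == m:
--             max_weight = max(max_weight, current_weight)
--
--     return max_weight
-- ===== SOURCE B (Python) =====
-- def max_weight_subarray(n, m, array):
--     # One pass over array[0..n-1] using running prefix sums: split into maximal
--     # runs of elements >= m (elements < m are barriers); for each occurrence of m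
--     # the window's left edge is fixed just after the previous m (or the run start)
--     # and the best right edge is the maximum prefix sum seen up to the next
--     # m / barrier / end of run.
--     best = -1
--     pre = 0        # prefix sum of array[0..i-1]
--     run_pre = 0    # prefix sum at the start of the current run
--     open_m = False # an occurrence of m is open in the current run
--     l_pre = 0      # prefix sum at the fixed left edge of the open occurrence
--     max_pre = 0    # max prefix sum over right edges seen for the open occurrence
--     for i in range(n):
--         v = array[i]
--         if v < m:
--             # barrier: close any open occurrence, start a new run after i
--             if open_m:
--                 if max_pre - l_pre > best:
--                     best = max_pre - l_pre
--                 open_m = False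
--             run_pre = pre + v
--         elif v == m:
--             if open_m:
--                 # close the previous occurrence; new left edge is just after it
--                 if max_pre - l_pre > best:
--                     best = max_pre - l_pre
--                 l_pre = prev_after
--             else:
--                 open_m = True
--                 l_pre = run_pre
--             max_pre = pre + v
--             prev_after = pre + v
--         else:
--             if open_m and pre + v > max_pre:
--                 max_pre = pre + v
--         pre += v
--     if open_m and max_pre - l_pre > best:
--         best = max_pre - l_pre
--     return best
-- ===== Notes on version B (the rewrite author's own statement) =====
-- stated objective: simpler
-- what changed: Replaces A's sliding window with a monotonic min-deque and two inner while loops by a single prefix-sum pass that partitions the array into maximal runs of elements >= m and, for each occurrence of m, subtracts the prefix sum at its fixed left edge from the running maximum prefix sum up to the next m/barrier.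
import Mathlib
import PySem

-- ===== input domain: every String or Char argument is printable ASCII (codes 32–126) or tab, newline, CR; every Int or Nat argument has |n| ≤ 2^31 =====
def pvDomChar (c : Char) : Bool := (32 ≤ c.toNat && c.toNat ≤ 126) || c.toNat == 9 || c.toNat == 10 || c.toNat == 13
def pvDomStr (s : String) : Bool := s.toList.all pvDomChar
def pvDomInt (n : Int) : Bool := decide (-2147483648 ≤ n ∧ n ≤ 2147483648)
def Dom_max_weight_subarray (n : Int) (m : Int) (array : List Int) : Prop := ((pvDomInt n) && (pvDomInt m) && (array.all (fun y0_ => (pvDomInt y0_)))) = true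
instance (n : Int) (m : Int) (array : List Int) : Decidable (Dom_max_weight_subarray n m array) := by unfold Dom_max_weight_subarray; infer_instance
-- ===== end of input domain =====

-- B replaces A's sliding window (monotonic deque + two inner while loops) by a single
-- prefix-sum pass over maximal runs of elements ≥ m (objective: simpler).

-- ===== PORT A =====
-- the inner 'while min_queue and array[min_queue[-1]] > array[right]: min_queue.pop()'
-- (pops the maximal all-greater suffix of the queue)
def pvPopTail (a : List Int) (v : Int) : List Int → List Int
  | [] => []
  | x :: xs =>
    let r := pvPopTail a v xs
    if r = [] ∧ PySem.List.pyGetD a x 0 > v then [] else x :: r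

-- the shrink 'while count_m > 1 or (count_m == 1 and array[min_queue[0]] < m)':
-- state (count_m, current_weight, left, min_queue); fuel only bounds the iteration
-- count (each iteration advances left by one, so (right+2).toNat at the call site suffices)
def pvShrink (a : List Int) (m : Int) : Nat → Int × Int × Int × List Int → Int × Int × Int × List Int
  | 0, s => s
  | fuel + 1, (cnt, cur, left, q) =>
    if cnt > 1 ∨ (cnt = 1 ∧ PySem.List.pyGetD a (q.headD 0) 0 < m) then
      let al := PySem.List.pyGetD a left 0
      let cnt' := if al = m then cnt - 1 else cnt
      let cur' := cur - al
      let q' := if q ≠ [] ∧ q.headD 0 = left then q.tail else q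
      pvShrink a m fuel (cnt', cur', left + 1, q')
    else (cnt, cur, left, q)

-- one iteration of A's 'for right in range(n)'; state (max_weight, left, count_m, current_weight, min_queue)
def pvStepA (a : List Int) (m : Int) (s : Int × Int × Int × Int × List Int) (right : Int) :
    Int × Int × Int × Int × List Int :=
  match s with
  | (maxw, left, cnt, cur, q) =>
    let v := PySem.List.pyGetD a right 0
    let cnt1 := if v = m then cnt + 1 else cnt
    let cur1 := cur + v
    let q1 := pvPopTail a v q ++ [right]
    match pvShrink a m (right + 2).toNat (cnt1, cur1, left, q1) with
    | (cnt2, cur2, left2, q2) =>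
      ((if cnt2 = 1 ∧ PySem.List.pyGetD a (q2.headD 0) 0 = m then max maxw cur2 else maxw),
       left2, cnt2, cur2, q2)

def max_weight_subarray (n : Int) (m : Int) (array : List Int) : Int :=
  ((PySem.List.pyRange 0 n 1).foldl (pvStepA array m) (-1, 0, 0, 0, [])).1

-- ===== PORT B =====
-- one iteration of B's loop; state (best, pre, run_pre, open_m, l_pre, max_pre, prev_after)
def pvStepB (a : List Int) (m : Int) (s : Int × Int × Int × Bool × Int × Int × Int) (i : Int) :
    Int × Int × Int × Bool × Int × Int × Int :=
  match s with
  | (best, pre, runpre, opn, lpre, maxpre, prevafter) =>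
    let v := PySem.List.pyGetD a i 0
    if v < m then
      ((if opn then (if maxpre - lpre > best then maxpre - lpre else best) else best),
       pre + v, pre + v, false, lpre, maxpre, prevafter)
    else if v = m then
      if opn then
        ((if maxpre - lpre > best then maxpre - lpre else best),
         pre + v, runpre, true, prevafter, pre + v, pre + v)
      else
        (best, pre + v, runpre, true, runpre, pre + v, pre + v)
    else
      (best, pre + v, runpre, opn, lpre,
       (if opn ∧ pre + v > maxpre then pre + v else maxpre), prevafter)

def max_weight_subarray_alt (n : Int) (m : Int) (array : List Int) : Int :=
  match (PySem.List.pyRange 0 n 1).foldl (pvStepB array m) (-1, 0, 0, false, 0, 0, 0) with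
  | (best, _, _, opn, lpre, maxpre, _) =>
    if opn ∧ maxpre - lpre > best then maxpre - lpre else best

-- ===== PRECONDITION & SPEC =====
-- Pre_ excludes n > len(array), where A raises IndexError at array[right]
def Pre_max_weight_subarray (n : Int) (m : Int) (array : List Int) : Prop := n ≤ (array.length : Int)
instance (n : Int) (m : Int) (array : List Int) : Decidable (Pre_max_weight_subarray n m array) := by unfold Pre_max_weight_subarray; infer_instance
def pvWitness_max_weight_subarray : Int × Int × List Int := (4, 2, [1, 2, 3, 2])

def Spec_max_weight_subarray (n : Int) (m : Int) (array : List Int) (out : Int) : Prop := out = max_weight_subarray_alt n m array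
instance (n : Int) (m : Int) (array : List Int) (out : Int) : Decidable (Spec_max_weight_subarray n m array out) := by unfold Spec_max_weight_subarray; infer_instance

-- ===== CLAIM (what is proved, stated in full; the proofs are below) =====
def Claim_equal_max_weight_subarray : Prop := ∀ (n : Int) (m : Int) (array : List Int), Dom_max_weight_subarray n m array → Pre_max_weight_subarray n m array → Spec_max_weight_subarray n m array (max_weight_subarray n m array)

-- ===== LEMMAS AND PROOFS =====

/-! Ghost description of both loops after k iterations, as functions of the input. -/

/-- prefix sum of the first `k` elements -/
def pvS (a : List Int) (k : Nat) : Int := (a.take k).sum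

/-- start of the current maximal run of elements ≥ m (one past the last barrier) -/
def pvRunS (a : List Int) (m : Int) : Nat → Nat
  | 0 => 0
  | k + 1 => if a.getD k 0 < m then k + 1 else pvRunS a m k

/-- is an occurrence of m open (an m in the current run)? -/
def pvOpn (a : List Int) (m : Int) : Nat → Bool
  | 0 => false
  | k + 1 => if a.getD k 0 < m then false else if a.getD k 0 = m then true else pvOpn a m k

/-- index of the last occurrence of m (meaningful while `pvOpn`) -/
def pvLastM (a : List Int) (m : Int) : Nat → Nat
  | 0 => 0
  | k + 1 => if a.getD k 0 = m then k else pvLastM a m k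

/-- A's `left` pointer after k iterations -/
def pvLeft (a : List Int) (m : Int) : Nat → Nat
  | 0 => 0
  | k + 1 =>
    if a.getD k 0 < m then (if pvOpn a m k then pvLastM a m k + 1 else pvLeft a m k)
    else if a.getD k 0 = m then (if pvOpn a m k then pvLastM a m k + 1 else pvRunS a m k)
    else pvLeft a m k

/-- B's `prev_after` (prefix sum just after the last m; meaningful while `pvOpn`) -/
def pvPA (a : List Int) (m : Int) : Nat → Int
  | 0 => 0
  | k + 1 => if a.getD k 0 = m then pvS a (k + 1) else pvPA a m k

/-- B's `l_pre` (meaningful while `pvOpn`) -/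
def pvLpre (a : List Int) (m : Int) : Nat → Int
  | 0 => 0
  | k + 1 =>
    if a.getD k 0 = m then (if pvOpn a m k then pvPA a m k else pvS a (pvRunS a m k))
    else pvLpre a m k

/-- B's `max_pre` (meaningful while `pvOpn`) -/
def pvMP (a : List Int) (m : Int) : Nat → Int
  | 0 => 0
  | k + 1 =>
    if a.getD k 0 < m then pvMP a m k
    else if a.getD k 0 = m then pvS a (k + 1)
    else if pvOpn a m k ∧ pvS a (k + 1) > pvMP a m k then pvS a (k + 1) else pvMP a m k

/-- B's `best` -/
def pvBest (a : List Int) (m : Int) : Nat → Int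
  | 0 => -1
  | k + 1 =>
    if a.getD k 0 < m then
      (if pvOpn a m k then
        (if pvMP a m k - pvLpre a m k > pvBest a m k then pvMP a m k - pvLpre a m k else pvBest a m k)
       else pvBest a m k)
    else if a.getD k 0 = m then
      (if pvOpn a m k then
        (if pvMP a m k - pvLpre a m k > pvBest a m k then pvMP a m k - pvLpre a m k else pvBest a m k)
       else pvBest a m k)
    else pvBest a m k

/-- A's `count_m` -/
def pvCnt (a : List Int) (m : Int) (k : Nat) : Int := if pvOpn a m k then 1 else 0

/-- A's `max_weight` -/
def pvMaxw (a : List Int) (m : Int) (k : Nat) : Int :=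
  if pvOpn a m k then max (pvBest a m k) (pvMP a m k - pvLpre a m k) else pvBest a m k

/-- does index j survive in the monotone min-queue with window right end hi? -/
def pvKeepB (a : List Int) (hi j : Nat) : Bool :=
  (List.range hi).all fun j' => !(decide (j < j')) || decide (a.getD j 0 ≤ a.getD j' 0)

/-- the monotone min-queue of window [lo, hi), as Nat indices -/
def pvMQ (a : List Int) (lo hi : Nat) : List Nat :=
  (List.range hi).filter fun j => decide (lo ≤ j) && pvKeepB a hi j

/-- number of occurrences of m in [lo, hi) -/
def pvCntW (a : List Int) (m : Int) (lo hi : Nat) : Int :=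
  ((List.range' lo (hi - lo)).countP fun j => decide (a.getD j 0 = m) : Nat)

/-- the shrink-loop guard, semantically -/
def pvCond (a : List Int) (m : Int) (t hi : Nat) : Prop :=
  pvCntW a m t hi > 1 ∨ (pvCntW a m t hi = 1 ∧ ∃ j, t ≤ j ∧ j < hi ∧ a.getD j 0 < m)

def pvAState (a : List Int) (m : Int) (k : Nat) : Int × Int × Int × Int × List Int :=
  (pvMaxw a m k, (pvLeft a m k : Int), pvCnt a m k, pvS a k - pvS a (pvLeft a m k),
   (pvMQ a (pvLeft a m k) k).map Int.ofNat)

def pvBState (a : List Int) (m : Int) (k : Nat) : Int × Int × Int × Bool × Int × Int × Int :=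
  (pvBest a m k, pvS a k, pvS a (pvRunS a m k), pvOpn a m k, pvLpre a m k, pvMP a m k, pvPA a m k)

-- basic facts
theorem pvS_succ (a : List Int) (k : Nat) : pvS a (k + 1) = pvS a k + a.getD k 0 := by
  unfold pvS
  rw [List.take_add_one, List.sum_append]
  rcases h : a[k]? with _ | x
  · simp [List.getD_eq_getElem?_getD, h]
  · simp [List.getD_eq_getElem?_getD, h]
theorem pvRunS_le (a : List Int) (m : Int) (k : Nat) : pvRunS a m k ≤ k := by
  induction k with
  | zero => simp [pvRunS]
  | succ k ih => unfold pvRunS; split <;> omega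
theorem pvRunS_no_bar (a : List Int) (m : Int) (k : Nat) :
    ∀ j, pvRunS a m k ≤ j → j < k → m ≤ a.getD j 0 := by
  induction k with
  | zero => omega
  | succ k ih =>
    intro j h1 h2
    unfold pvRunS at h1
    split at h1
    · omega
    · rcases Nat.lt_or_ge j k with h3 | h3
      · exact ih j h1 h3
      · have : j = k := by omega
        subst this; omega
theorem pvRunS_bar (a : List Int) (m : Int) (k : Nat) (h : 0 < pvRunS a m k) :
    a.getD (pvRunS a m k - 1) 0 < m := by
  induction k with
  | zero => simp [pvRunS] at h
  | succ k ih =>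
    unfold pvRunS at h ⊢
    split at h
    · simp_all
    · simp only [if_neg (by assumption)]
      exact ih h
theorem pvOpn_no_m (a : List Int) (m : Int) (k : Nat) (h : pvOpn a m k = false) :
    ∀ j, pvRunS a m k ≤ j → j < k → a.getD j 0 ≠ m := by
  induction k with
  | zero => intro j h1 h2; omega
  | succ k ih =>
    intro j h1 h2
    unfold pvOpn at h
    unfold pvRunS at h1
    split at h
    · rename_i hb; rw [if_pos hb] at h1; omega
    · rename_i hb
      rw [if_neg hb] at h1
      split at h
      · exact absurd h (by simp)
      · rcases Nat.lt_or_ge j k with h3 | h3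
        · exact ih h j h1 h3
        · have : j = k := by omega
          subst this; assumption

/-- the standing invariant on the ghost functions -/
theorem pvGhost (a : List Int) (m : Int) (k : Nat) :
    pvLeft a m k ≤ k ∧
    (pvOpn a m k = false →
      (∀ j, pvLeft a m k ≤ j → j < k → a.getD j 0 ≠ m) ∧ pvLeft a m k ≤ pvRunS a m k) ∧
    (pvOpn a m k = true →
      pvLeft a m k ≤ pvLastM a m k ∧ pvLastM a m k < k ∧ a.getD (pvLastM a m k) 0 = m ∧
      (∀ j, pvLeft a m k ≤ j → j < k → m ≤ a.getD j 0) ∧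
      (∀ j, pvLeft a m k ≤ j → j < k → a.getD j 0 = m → j = pvLastM a m k) ∧
      pvLpre a m k = pvS a (pvLeft a m k) ∧
      pvPA a m k = pvS a (pvLastM a m k + 1)) := by
  induction k with
  | zero =>
    refine ⟨Nat.le_refl 0, fun _ => ⟨fun j h1 h2 => by omega, Nat.le_refl 0⟩, fun hc => ?_⟩
    simp [pvOpn] at hc
  | succ k ih =>
    obtain ⟨ihle, ihf, iht⟩ := ih
    rcases lt_trichotomy (a.getD k 0) m with hv | hv | hv
    · -- a[k] is a barrier (< m)
      have hnm : a.getD k 0 ≠ m := by omega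
      have eO : pvOpn a m (k + 1) = false := by (conv_lhs => unfold pvOpn); rw [if_pos hv]
      have eR : pvRunS a m (k + 1) = k + 1 := by (conv_lhs => unfold pvRunS); rw [if_pos hv]
      cases hop : pvOpn a m k with
      | true =>
        obtain ⟨g1, g2, g3, g4, g5, g6, g7⟩ := iht hop
        have eL : pvLeft a m (k + 1) = pvLastM a m k + 1 := by (conv_lhs => unfold pvLeft); rw [if_pos hv, if_pos hop]
        refine ⟨by omega, fun _ => ⟨?_, by omega⟩, fun hc => absurd (eO.symm.trans hc) Bool.false_ne_true⟩
        intro j h1 h2 hm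
        rw [eL] at h1
        rcases Nat.lt_or_ge j k with h3 | h3
        · have := g5 j (by omega) h3 hm
          omega
        · have : j = k := by omega
          subst this; exact hnm hm
      | false =>
        obtain ⟨hnom, hrs⟩ := ihf hop
        have eL : pvLeft a m (k + 1) = pvLeft a m k := by (conv_lhs => unfold pvLeft); rw [if_pos hv, if_neg (by rw [hop]; exact Bool.false_ne_true)]
        refine ⟨by omega, fun _ => ⟨?_, by omega⟩, fun hc => absurd (eO.symm.trans hc) Bool.false_ne_true⟩
        intro j h1 h2 hm
        rw [eL] at h1
        rcases Nat.lt_or_ge j k with h3 | h3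
        · exact hnom j h1 h3 hm
        · have : j = k := by omega
          subst this; exact hnm hm
    · -- a[k] = m
      have hnlt : ¬(a.getD k 0 < m) := by omega
      have eO : pvOpn a m (k + 1) = true := by (conv_lhs => unfold pvOpn); rw [if_neg hnlt, if_pos hv]
      have eLM : pvLastM a m (k + 1) = k := by (conv_lhs => unfold pvLastM); rw [if_pos hv]
      have ePA : pvPA a m (k + 1) = pvS a (k + 1) := by (conv_lhs => unfold pvPA); rw [if_pos hv]
      cases hop : pvOpn a m k with
      | true =>
        obtain ⟨g1, g2, g3, g4, g5, g6, g7⟩ := iht hop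
        have eL : pvLeft a m (k + 1) = pvLastM a m k + 1 := by (conv_lhs => unfold pvLeft); rw [if_neg hnlt, if_pos hv, if_pos hop]
        have eLp : pvLpre a m (k + 1) = pvPA a m k := by (conv_lhs => unfold pvLpre); rw [if_pos hv, if_pos hop]
        refine ⟨by omega, fun hc => absurd (eO.symm.trans hc).symm Bool.false_ne_true, fun _ => ?_⟩
        rw [eL, eLM, eLp, ePA]
        refine ⟨by omega, by omega, hv, ?_, ?_, by rw [g7], rfl⟩
        · intro j h1 h2
          rcases Nat.lt_or_ge j k with h3 | h3
          · exact g4 j (by omega) h3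
          · have : j = k := by omega
            subst this; omega
        · intro j h1 h2 hm
          rcases Nat.lt_or_ge j k with h3 | h3
          · have := g5 j (by omega) h3 hm
            omega
          · omega
      | false =>
        obtain ⟨hnom, hrs⟩ := ihf hop
        have hru := pvRunS_le a m k
        have eL : pvLeft a m (k + 1) = pvRunS a m k := by (conv_lhs => unfold pvLeft); rw [if_neg hnlt, if_pos hv, if_neg (by rw [hop]; exact Bool.false_ne_true)]
        have eLp : pvLpre a m (k + 1) = pvS a (pvRunS a m k) := by (conv_lhs => unfold pvLpre); rw [if_pos hv, if_neg (by rw [hop]; exact Bool.false_ne_true)]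
        refine ⟨by omega, fun hc => absurd (eO.symm.trans hc).symm Bool.false_ne_true, fun _ => ?_⟩
        rw [eL, eLM, eLp, ePA]
        refine ⟨by omega, by omega, hv, ?_, ?_, rfl, rfl⟩
        · intro j h1 h2
          rcases Nat.lt_or_ge j k with h3 | h3
          · exact pvRunS_no_bar a m k j h1 h3
          · have : j = k := by omega
            subst this; omega
        · intro j h1 h2 hm
          rcases Nat.lt_or_ge j k with h3 | h3
          · exact absurd hm (pvOpn_no_m a m k hop j h1 h3)
          · omega
    · -- a[k] > m
      have hnlt : ¬(a.getD k 0 < m) := by omega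
      have hnm : a.getD k 0 ≠ m := by omega
      have eO : pvOpn a m (k + 1) = pvOpn a m k := by (conv_lhs => unfold pvOpn); rw [if_neg hnlt, if_neg hnm]
      have eR : pvRunS a m (k + 1) = pvRunS a m k := by (conv_lhs => unfold pvRunS); rw [if_neg hnlt]
      have eLM : pvLastM a m (k + 1) = pvLastM a m k := by (conv_lhs => unfold pvLastM); rw [if_neg hnm]
      have eL : pvLeft a m (k + 1) = pvLeft a m k := by (conv_lhs => unfold pvLeft); rw [if_neg hnlt, if_neg hnm]
      have eLp : pvLpre a m (k + 1) = pvLpre a m k := by (conv_lhs => unfold pvLpre); rw [if_neg hnm]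
      have ePA : pvPA a m (k + 1) = pvPA a m k := by (conv_lhs => unfold pvPA); rw [if_neg hnm]
      refine ⟨by omega, fun hc => ?_, fun hc => ?_⟩
      · rw [eO] at hc
        obtain ⟨hnom, hrs⟩ := ihf hc
        rw [eL, eR]
        refine ⟨?_, hrs⟩
        intro j h1 h2 hm
        rcases Nat.lt_or_ge j k with h3 | h3
        · exact hnom j h1 h3 hm
        · have : j = k := by omega
          subst this; exact hnm hm
      · rw [eO] at hc
        obtain ⟨g1, g2, g3, g4, g5, g6, g7⟩ := iht hc
        rw [eL, eLM, eLp, ePA]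
        refine ⟨g1, by omega, g3, ?_, ?_, g6, g7⟩
        · intro j h1 h2
          rcases Nat.lt_or_ge j k with h3 | h3
          · exact g4 j h1 h3
          · have : j = k := by omega
            subst this; omega
        · intro j h1 h2 hm
          rcases Nat.lt_or_ge j k with h3 | h3
          · exact g5 j h1 h3 hm
          · have : j = k := by omega
            subst this; exact absurd hm hnm

-- counting lemmas
theorem pvCntW_nil (a : List Int) (m : Int) (lo hi : Nat) (h : hi ≤ lo) : pvCntW a m lo hi = 0 := by
  unfold pvCntW
  have : hi - lo = 0 := by omega
  simp [this]
theorem pvCntW_step (a : List Int) (m : Int) (lo hi : Nat) (h : lo < hi) :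
    pvCntW a m lo hi = (if a.getD lo 0 = m then 1 else 0) + pvCntW a m (lo + 1) hi := by
  unfold pvCntW
  have h1 : hi - lo = (hi - (lo + 1)) + 1 := by omega
  rw [h1, List.range'_succ, List.countP_cons]
  split <;> simp_all <;> omega
theorem pvCntW_split (a : List Int) (m : Int) (lo mid hi : Nat) (h1 : lo ≤ mid) (h2 : mid ≤ hi) :
    pvCntW a m lo hi = pvCntW a m lo mid + pvCntW a m mid hi := by
  unfold pvCntW
  have h3 : List.range' lo (hi - lo) = List.range' lo (mid - lo) ++ List.range' (lo + 1 * (mid - lo)) (hi - mid) := by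
    rw [List.range'_append]
    congr 1
    omega
  rw [h3, List.countP_append]
  have h4 : lo + 1 * (mid - lo) = mid := by omega
  rw [h4]
  push_cast
  ring
theorem pvCntW_zero (a : List Int) (m : Int) (lo hi : Nat)
    (h : ∀ j, lo ≤ j → j < hi → a.getD j 0 ≠ m) : pvCntW a m lo hi = 0 := by
  unfold pvCntW
  have : (List.range' lo (hi - lo)).countP (fun j => decide (a.getD j 0 = m)) = 0 := by
    rw [List.countP_eq_zero]
    intro j hj
    rw [List.mem_range'_1] at hj
    simpa [List.getD_eq_getElem?_getD] using h j hj.1 (by omega)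
  exact_mod_cast this
theorem pvCntW_one (a : List Int) (m : Int) (lo hi i : Nat) (h1 : lo ≤ i) (h2 : i < hi)
    (h3 : a.getD i 0 = m) (h4 : ∀ j, lo ≤ j → j < hi → a.getD j 0 = m → j = i) :
    pvCntW a m lo hi = 1 := by
  have e1 : pvCntW a m lo hi = pvCntW a m lo i + pvCntW a m i hi := pvCntW_split a m lo i hi h1 (by omega)
  have e2 : pvCntW a m i hi = (if a.getD i 0 = m then 1 else 0) + pvCntW a m (i + 1) hi := pvCntW_step a m i hi h2
  have e3 : pvCntW a m lo i = 0 := pvCntW_zero a m lo i (fun j hj1 hj2 hm => by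
    have := h4 j hj1 (by omega) hm; omega)
  have e4 : pvCntW a m (i + 1) hi = 0 := pvCntW_zero a m (i + 1) hi (fun j hj1 hj2 hm => by
    have := h4 j (by omega) hj2 hm; omega)
  rw [e1, e2, e3, e4, if_pos h3]; ring

-- queue lemmas
theorem pvKeepB_iff (a : List Int) (hi j : Nat) :
    pvKeepB a hi j = true ↔ ∀ j', j < j' → j' < hi → a.getD j 0 ≤ a.getD j' 0 := by
  unfold pvKeepB
  rw [List.all_eq_true]
  constructor
  · intro h j' hj1 hj2
    have := h j' (List.mem_range.mpr hj2)
    simp only [Bool.or_eq_true, Bool.not_eq_eq_eq_not, Bool.not_true, decide_eq_false_iff_not,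
      decide_eq_true_eq] at this
    rcases this with h' | h'
    · omega
    · exact h'
  · intro h j' hj
    rw [List.mem_range] at hj
    by_cases hlt : j < j'
    · have := h j' hlt hj
      simp [hlt, List.getD_eq_getElem?_getD] at this ⊢
      exact this
    · simp [hlt]
theorem pvMQ_mem (a : List Int) (lo hi j : Nat) :
    j ∈ pvMQ a lo hi ↔ lo ≤ j ∧ j < hi ∧ ∀ j', j < j' → j' < hi → a.getD j 0 ≤ a.getD j' 0 := by
  unfold pvMQ
  rw [List.mem_filter, List.mem_range, Bool.and_eq_true, decide_eq_true_eq, pvKeepB_iff]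
  tauto
theorem pvMQ_sorted (a : List Int) (lo hi : Nat) : (pvMQ a lo hi).Pairwise (· < ·) := by
  unfold pvMQ
  exact List.Pairwise.sublist List.filter_sublist List.pairwise_lt_range
theorem pvPopTail_eq_filter (a : List Int) (v : Int) (l : List Nat)
    (h : l.Pairwise fun j1 j2 => a.getD j1 0 ≤ a.getD j2 0) :
    pvPopTail a v (l.map Int.ofNat) =
      (l.filter fun j => decide (a.getD j 0 ≤ v)).map Int.ofNat := by
  induction l with
  | nil => simp [pvPopTail]
  | cons x t ih =>
    rw [List.pairwise_cons] at h
    have hstep : pvPopTail a v ((x :: t).map Int.ofNat) =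
        (if pvPopTail a v (t.map Int.ofNat) = [] ∧ PySem.List.pyGetD a (Int.ofNat x) 0 > v
         then [] else (Int.ofNat x) :: pvPopTail a v (t.map Int.ofNat)) := rfl
    rw [hstep, ih h.2, List.filter_cons]
    by_cases hx : a.getD x 0 ≤ v
    · rw [if_neg, if_pos (by simp only [decide_eq_true_eq]; exact hx)]
      · rfl
      · rintro ⟨h1, h2⟩
        rw [show (Int.ofNat x) = (x : Int) from rfl, PySem.List.pyGetD_natCast] at h2
        omega
    · have hflt : t.filter (fun j => decide (a.getD j 0 ≤ v)) = [] := by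
        rw [List.filter_eq_nil_iff]
        intro j hj
        simp only [decide_eq_true_eq, not_le]
        exact lt_of_lt_of_le (not_le.mp hx) (h.1 j hj)
      have hgt : PySem.List.pyGetD a (Int.ofNat x) 0 > v := by
        rw [show (Int.ofNat x) = (x : Int) from rfl, PySem.List.pyGetD_natCast]
        omega
      rw [hflt, if_pos ⟨List.map_nil, hgt⟩, if_neg (by simp only [decide_eq_true_eq]; exact hx)]
      exact (List.map_nil).symm
theorem pvMQ_extend (a : List Int) (m : Int) (lo k : Nat) (h : lo ≤ k) :
    pvPopTail a (a.getD k 0) ((pvMQ a lo k).map Int.ofNat) ++ [(k : Int)] =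
      (pvMQ a lo (k + 1)).map Int.ofNat := by
  have hpw : (pvMQ a lo k).Pairwise (fun j1 j2 => a.getD j1 0 ≤ a.getD j2 0) := by
    refine (pvMQ_sorted a lo k).imp_of_mem ?_
    intro j1 j2 hm1 hm2 hlt
    exact ((pvMQ_mem a lo k j1).mp hm1).2.2 j2 hlt ((pvMQ_mem a lo k j2).mp hm2).2.1
  rw [pvPopTail_eq_filter a _ _ hpw]
  have : (pvMQ a lo k).filter (fun j => decide (a.getD j 0 ≤ a.getD k 0)) ++ [k] = pvMQ a lo (k + 1) := by
    unfold pvMQ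
    rw [List.filter_filter, List.range_succ, List.filter_append]
    congr 1
    · apply List.filter_congr
      intro j hj
      rw [List.mem_range] at hj
      rw [Bool.eq_iff_iff]
      simp only [Bool.and_eq_true, decide_eq_true_eq, pvKeepB_iff]
      constructor
      · rintro ⟨hv, hlo, hk⟩
        refine ⟨hlo, ?_⟩
        intro j' h1 h2
        rcases Nat.lt_or_ge j' k with h3 | h3
        · exact hk j' h1 h3
        · have : j' = k := by omega
          subst this; exact hv
      · rintro ⟨hlo, hk⟩
        exact ⟨hk k hj (by omega), hlo, fun j' h1 h2 => hk j' h1 (by omega)⟩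
    · symm
      simp only [List.filter_cons, List.filter_nil]
      rw [if_pos]
      simp only [Bool.and_eq_true, decide_eq_true_eq, pvKeepB_iff]
      exact ⟨h, fun j' h1 h2 => by omega⟩
  rw [← this, List.map_append]
  rfl
theorem pvMQ_cons (a : List Int) (lo hi : Nat) (h1 : lo < hi) (h2 : pvKeepB a hi lo = true) :
    pvMQ a lo hi = lo :: pvMQ a (lo + 1) hi := by
  unfold pvMQ
  have hsplit : hi = (lo + 1) + (hi - lo - 1) := by omega
  rw [hsplit, List.range_add, List.filter_append, List.filter_append, List.range_succ,
    List.filter_append, List.filter_append]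
  have e1 : (List.range lo).filter (fun j => decide (lo ≤ j) && pvKeepB a ((lo+1)+(hi-lo-1)) j) = [] := by
    rw [List.filter_eq_nil_iff]
    intro j hj
    rw [List.mem_range] at hj
    simp [Nat.not_le.mpr hj]
  have e1' : (List.range lo).filter (fun j => decide (lo + 1 ≤ j) && pvKeepB a ((lo+1)+(hi-lo-1)) j) = [] := by
    rw [List.filter_eq_nil_iff]
    intro j hj
    rw [List.mem_range] at hj
    simp [show ¬(lo + 1 ≤ j) by omega]
  have e2 : ([lo]).filter (fun j => decide (lo ≤ j) && pvKeepB a ((lo+1)+(hi-lo-1)) j) = [lo] := by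
    simp only [List.filter_cons, List.filter_nil]
    rw [if_pos]
    rw [show (lo+1)+(hi-lo-1) = hi by omega]
    simp [h2]
  have e2' : ([lo]).filter (fun j => decide (lo + 1 ≤ j) && pvKeepB a ((lo+1)+(hi-lo-1)) j) = [] := by
    simp
  have e3 : ∀ K : Nat → Bool, ((List.range (hi-lo-1)).map ((lo+1) + ·)).filter (fun j => decide (lo ≤ j) && K j) =
      ((List.range (hi-lo-1)).map ((lo+1) + ·)).filter (fun j => decide (lo + 1 ≤ j) && K j) := by
    intro K
    apply List.filter_congr
    intro j hj
    rw [List.mem_map] at hj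
    obtain ⟨i, _, rfl⟩ := hj
    simp [show lo ≤ lo + 1 + i by omega, show lo + 1 ≤ lo + 1 + i by omega]
  rw [e1, e1', e2, e2', e3]
  rfl

theorem pvMQ_skip (a : List Int) (lo hi : Nat) (h : ¬(lo < hi ∧ pvKeepB a hi lo = true)) :
    pvMQ a lo hi = pvMQ a (lo + 1) hi := by
  unfold pvMQ
  apply List.filter_congr
  intro j hj
  rw [List.mem_range] at hj
  rcases Nat.lt_trichotomy j lo with h1 | h1 | h1
  · simp [Nat.not_le.mpr h1, show ¬(lo + 1 ≤ j) by omega]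
  · subst h1
    have : pvKeepB a hi j = false := by
      rcases Bool.eq_false_or_eq_true (pvKeepB a hi j) with hb | hb
      · exact absurd ⟨hj, hb⟩ h
      · exact hb
    simp [this, show ¬(j + 1 ≤ j) by omega]
  · simp [show lo ≤ j by omega, show lo + 1 ≤ j by omega]

theorem pvMQ_lb (a : List Int) (lo hi j : Nat) (h : j ∈ pvMQ a lo hi) : lo ≤ j :=
  ((pvMQ_mem a lo hi j).mp h).1

theorem pvMQ_head (a : List Int) (lo hi : Nat) (h : lo < hi) :
    ∃ h0 : Nat, lo ≤ h0 ∧ h0 < hi ∧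
      ((pvMQ a lo hi).map Int.ofNat).headD 0 = (h0 : Int) ∧
      ∀ j, lo ≤ j → j < hi → a.getD h0 0 ≤ a.getD j 0 := by
  cases hl : pvMQ a lo hi with
  | nil =>
    exfalso
    have : hi - 1 ∈ pvMQ a lo hi := by
      rw [pvMQ_mem]
      exact ⟨by omega, by omega, fun j' h1 h2 => by omega⟩
    rw [hl] at this
    exact absurd this (List.not_mem_nil)
  | cons x t =>
    have hx : x ∈ pvMQ a lo hi := by rw [hl]; exact List.mem_cons_self
    rw [pvMQ_mem] at hx
    obtain ⟨hlo, hhi, hkeep⟩ := hx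
    have hsorted := pvMQ_sorted a lo hi
    rw [hl, List.pairwise_cons] at hsorted
    refine ⟨x, hlo, hhi, by simp, ?_⟩
    have key : ∀ d j, lo ≤ j → j < hi → x - j ≤ d → a.getD x 0 ≤ a.getD j 0 := by
      intro d
      induction d with
      | zero =>
        intro j hj1 hj2 hj3
        rcases Nat.lt_or_ge j x with hc | hc
        · omega
        · rcases Nat.eq_or_lt_of_le hc with hc' | hc'
          · rw [← hc']
          · exact hkeep j hc' hj2
      | succ d ih =>
        intro j hj1 hj2 hj3
        rcases Nat.lt_or_ge j x with hc | hc
        · have hnotmem : j ∉ pvMQ a lo hi := by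
            intro hmem
            rw [hl] at hmem
            rcases List.mem_cons.mp hmem with h' | h'
            · omega
            · have := hsorted.1 j h'
              omega
          rw [pvMQ_mem] at hnotmem
          push_neg at hnotmem
          obtain ⟨j1, hj11, hj12, hj13⟩ := hnotmem hj1 hj2
          rcases Nat.lt_or_ge j1 x with hd | hd
          · have : a.getD x 0 ≤ a.getD j1 0 := ih j1 (by omega) hj12 (by omega)
            omega
          · rcases Nat.eq_or_lt_of_le hd with hd' | hd'
            · rw [← hd'] at hj13
              omega
            · have := hkeep j1 hd' hj12
              omega
        · rcases Nat.eq_or_lt_of_le hc with hc' | hc'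
          · rw [← hc']
          · exact hkeep j hc' hj2
    intro j hj1 hj2
    exact key x j hj1 hj2 (by omega)
theorem pvMQ_popleft (a : List Int) (lo hi : Nat) :
    (if ((pvMQ a lo hi).map Int.ofNat) ≠ [] ∧
        (((pvMQ a lo hi).map Int.ofNat).headD 0) = (lo : Int)
     then ((pvMQ a lo hi).map Int.ofNat).tail
     else ((pvMQ a lo hi).map Int.ofNat)) =
      (pvMQ a (lo + 1) hi).map Int.ofNat := by
  by_cases hc : lo < hi ∧ pvKeepB a hi lo = true
  · rw [pvMQ_cons a lo hi hc.1 hc.2]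
    rw [if_pos ⟨by simp, by rfl⟩]
    rfl
  · rw [pvMQ_skip a lo hi hc]
    rw [if_neg]
    rintro ⟨hne, hhd⟩
    cases hl : pvMQ a (lo + 1) hi with
    | nil => rw [hl] at hne; simp at hne
    | cons x t =>
      rw [hl] at hhd
      have hx : x ∈ pvMQ a (lo + 1) hi := by rw [hl]; exact List.mem_cons_self
      have := pvMQ_lb a (lo + 1) hi x hx
      simp only [List.map_cons, List.headD_cons] at hhd
      have : x = lo := Int.ofNat.inj hhd
      omega

-- the shrink loop, characterized
theorem pvShrink_spec (a : List Int) (m : Int) :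
    ∀ (fuel lo tgt hi : Nat), lo ≤ tgt → tgt ≤ hi → tgt - lo ≤ fuel →
    (∀ t, lo ≤ t → t < tgt → pvCond a m t hi) → ¬ pvCond a m tgt hi →
    pvShrink a m fuel
      (pvCntW a m lo hi, pvS a hi - pvS a lo, (lo : Int), (pvMQ a lo hi).map Int.ofNat) =
      (pvCntW a m tgt hi, pvS a hi - pvS a tgt, (tgt : Int), (pvMQ a tgt hi).map Int.ofNat) := by
  intro fuel
  induction fuel with
  | zero =>
    intro lo tgt hi h1 h2 h3 hcond hstop
    have : lo = tgt := by omega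
    subst this
    rfl
  | succ fuel ih =>
    intro lo tgt hi h1 h2 h3 hcond hstop
    by_cases hlt : lo = tgt
    · subst hlt
      conv_lhs => unfold pvShrink
      rw [if_neg]
      unfold pvCond at hstop
      rintro (hg | ⟨hg1, hg2⟩)
      · exact hstop (Or.inl hg)
      · have hlohi : lo < hi := by
          by_contra hco
          have := pvCntW_nil a m lo hi (by omega)
          omega
        obtain ⟨h0, hh1, hh2, hd, hmin⟩ := pvMQ_head a lo hi hlohi
        rw [hd, PySem.List.pyGetD_natCast] at hg2
        exact hstop (Or.inr ⟨hg1, h0, hh1, hh2, hg2⟩)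
    · have hlo2 : lo < tgt := by omega
      have hlohi : lo < hi := by omega
      have hc' := hcond lo (Nat.le_refl lo) hlo2
      unfold pvCond at hc'
      have hg : pvCntW a m lo hi > 1 ∨ (pvCntW a m lo hi = 1 ∧
          PySem.List.pyGetD a (((pvMQ a lo hi).map Int.ofNat).headD 0) 0 < m) := by
        rcases hc' with hc | ⟨hc1, j, hj1, hj2, hj3⟩
        · exact Or.inl hc
        · obtain ⟨h0, hh1, hh2, hd, hmin⟩ := pvMQ_head a lo hi hlohi
          refine Or.inr ⟨hc1, ?_⟩
          rw [hd, PySem.List.pyGetD_natCast]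
          exact lt_of_le_of_lt (hmin j hj1 hj2) hj3
      conv_lhs => unfold pvShrink
      rw [if_pos hg]
      show pvShrink a m fuel
        ((if PySem.List.pyGetD a (lo : Int) 0 = m then pvCntW a m lo hi - 1 else pvCntW a m lo hi),
         (pvS a hi - pvS a lo) - PySem.List.pyGetD a (lo : Int) 0,
         ((lo : Int) + 1),
         (if ((pvMQ a lo hi).map Int.ofNat) ≠ [] ∧ (((pvMQ a lo hi).map Int.ofNat).headD 0) = (lo : Int)
          then ((pvMQ a lo hi).map Int.ofNat).tail else ((pvMQ a lo hi).map Int.ofNat))) = _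
      rw [PySem.List.pyGetD_natCast, pvMQ_popleft]
      have ecnt : (if a.getD lo 0 = m then pvCntW a m lo hi - 1 else pvCntW a m lo hi)
          = pvCntW a m (lo + 1) hi := by
        rw [pvCntW_step a m lo hi hlohi]
        split_ifs with hc <;> omega
      have ecur : pvS a hi - pvS a lo - a.getD lo 0 = pvS a hi - pvS a (lo + 1) := by
        rw [pvS_succ]
        ring
      have ecast : ((lo : Int) + 1) = ((lo + 1 : Nat) : Int) := by push_cast; ring
      rw [ecnt, ecur, ecast]
      clear hg hc' ecnt ecur ecast
      exact ih (lo + 1) tgt hi (by omega) h2 (by omega) (fun t ht1 ht2 => hcond t (by omega) ht2) hstop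


theorem pvMaxIte (X Y : Int) : (if X > Y then X else Y) = max Y X := by
  split_ifs with h
  · exact (max_eq_right h.le).symm
  · exact (max_eq_left (by omega)).symm

theorem pvHead_m (a : List Int) (m : Int) (lo hi : Nat) (hlo : lo < hi)
    (hge : ∀ j, lo ≤ j → j < hi → m ≤ a.getD j 0)
    (i : Nat) (hi1 : lo ≤ i) (hi2 : i < hi) (hival : a.getD i 0 = m) :
    PySem.List.pyGetD a (((pvMQ a lo hi).map Int.ofNat).headD 0) 0 = m := by
  obtain ⟨h0, hh1, hh2, hd, hmin⟩ := pvMQ_head a lo hi hlo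
  rw [hd, PySem.List.pyGetD_natCast]
  have h1 : m ≤ a.getD h0 0 := hge h0 hh1 hh2
  have h2 : a.getD h0 0 ≤ a.getD i 0 := hmin i hi1 hi2
  omega

-- the two step lemmas
theorem pvStepA_eq (a : List Int) (m : Int) (k : Nat) :
    pvStepA a m (pvAState a m k) (k : Int) = pvAState a m (k + 1) := by
  obtain ⟨hle, hf, ht⟩ := pvGhost a m k
  have hS := pvS_succ a k
  unfold pvStepA pvAState
  show (match pvShrink a m ((k : Int) + 2).toNat
      ((if PySem.List.pyGetD a (k : Int) 0 = m then pvCnt a m k + 1 else pvCnt a m k),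
       (pvS a k - pvS a (pvLeft a m k) + PySem.List.pyGetD a (k : Int) 0),
       ((pvLeft a m k : Int)),
       (pvPopTail a (PySem.List.pyGetD a (k : Int) 0) ((pvMQ a (pvLeft a m k) k).map Int.ofNat) ++ [(k : Int)])) with
    | (cnt2, cur2, left2, q2) =>
      ((if cnt2 = 1 ∧ PySem.List.pyGetD a (q2.headD 0) 0 = m then max (pvMaxw a m k) cur2 else pvMaxw a m k),
       left2, cnt2, cur2, q2))
    = (pvMaxw a m (k + 1), ((pvLeft a m (k + 1) : Int)), pvCnt a m (k + 1),
       pvS a (k + 1) - pvS a (pvLeft a m (k + 1)), (pvMQ a (pvLeft a m (k + 1)) (k + 1)).map Int.ofNat)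
  rw [PySem.List.pyGetD_natCast, show ((k : Int) + 2).toNat = k + 2 by omega,
    pvMQ_extend a m (pvLeft a m k) k hle]
  have ecur : pvS a k - pvS a (pvLeft a m k) + a.getD k 0 = pvS a (k + 1) - pvS a (pvLeft a m k) := by
    rw [hS]; ring
  rcases lt_trichotomy (a.getD k 0) m with hv | hv | hv
  · -- barrier
    have hnm : a.getD k 0 ≠ m := by omega
    have eO : pvOpn a m (k + 1) = false := by (conv_lhs => unfold pvOpn); rw [if_pos hv]
    rw [if_neg hnm, ecur]
    cases hop : pvOpn a m k with
    | true =>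
      obtain ⟨g1, g2, g3, g4, g5, g6, g7⟩ := ht hop
      have eL : pvLeft a m (k + 1) = pvLastM a m k + 1 := by
        (conv_lhs => unfold pvLeft); rw [if_pos hv, if_pos hop]
      have hw1 : pvCntW a m (pvLeft a m k) (k + 1) = 1 := by
        refine pvCntW_one a m _ _ (pvLastM a m k) g1 (by omega) g3 ?_
        intro j hj1 hj2 hm'
        rcases Nat.lt_or_ge j k with h3 | h3
        · exact g5 j hj1 h3 hm'
        · exfalso; have hjk : j = k := by omega
          subst hjk; exact hnm hm'
      have hw0 : pvCntW a m (pvLastM a m k + 1) (k + 1) = 0 := by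
        refine pvCntW_zero a m _ _ ?_
        intro j hj1 hj2 hm'
        rcases Nat.lt_or_ge j k with h3 | h3
        · have := g5 j (by omega) h3 hm'; omega
        · have hjk : j = k := by omega
          subst hjk; exact hnm hm'
      have ecnt : pvCnt a m k = pvCntW a m (pvLeft a m k) (k + 1) := by
        rw [hw1]; simp [pvCnt, hop]
      rw [ecnt]
      rw [pvShrink_spec a m (k + 2) (pvLeft a m k) (pvLastM a m k + 1) (k + 1)
        (by omega) (by omega) (by omega)
        (fun t ht1 ht2 => by
          unfold pvCond
          refine Or.inr ⟨?_, k, by omega, by omega, hv⟩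
          refine pvCntW_one a m _ _ (pvLastM a m k) (by omega) (by omega) g3 ?_
          intro j hj1 hj2 hm'
          rcases Nat.lt_or_ge j k with h3 | h3
          · exact g5 j (by omega) h3 hm'
          · have hjk : j = k := by omega
            subst hjk; exact absurd hm' hnm)
        (by
          unfold pvCond
          rintro (hg | ⟨hg1, _⟩) <;> omega)]
      show ((if pvCntW a m (pvLastM a m k + 1) (k + 1) = 1 ∧
            PySem.List.pyGetD a (((pvMQ a (pvLastM a m k + 1) (k + 1)).map Int.ofNat).headD 0) 0 = m
          then max (pvMaxw a m k) (pvS a (k + 1) - pvS a (pvLastM a m k + 1)) else pvMaxw a m k),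
        ((pvLastM a m k + 1 : Nat) : Int), pvCntW a m (pvLastM a m k + 1) (k + 1),
        pvS a (k + 1) - pvS a (pvLastM a m k + 1),
        (pvMQ a (pvLastM a m k + 1) (k + 1)).map Int.ofNat) = _
      rw [if_neg (by rw [hw0]; rintro ⟨hh, _⟩; exact absurd hh (by norm_num))]
      have eB : pvBest a m (k + 1) = max (pvBest a m k) (pvMP a m k - pvLpre a m k) := by
        (conv_lhs => unfold pvBest); rw [if_pos hv, if_pos hop, pvMaxIte]
      have eM1 : pvMaxw a m (k + 1) = pvMaxw a m k := by
        simp [pvMaxw, eO, eB, hop]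
      have ecn : pvCnt a m (k + 1) = pvCntW a m (pvLastM a m k + 1) (k + 1) := by
        rw [hw0]; simp [pvCnt, eO]
      rw [eM1, ecn, eL]
    | false =>
      obtain ⟨hnom, hrs⟩ := hf hop
      have eL : pvLeft a m (k + 1) = pvLeft a m k := by
        (conv_lhs => unfold pvLeft); rw [if_pos hv, if_neg (by rw [hop]; exact Bool.false_ne_true)]
      have hw0 : pvCntW a m (pvLeft a m k) (k + 1) = 0 := by
        refine pvCntW_zero a m _ _ ?_
        intro j hj1 hj2 hm'
        rcases Nat.lt_or_ge j k with h3 | h3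
        · exact hnom j hj1 h3 hm'
        · have hjk : j = k := by omega
          subst hjk; exact hnm hm'
      have ecnt : pvCnt a m k = pvCntW a m (pvLeft a m k) (k + 1) := by
        rw [hw0]; simp [pvCnt, hop]
      rw [ecnt]
      rw [pvShrink_spec a m (k + 2) (pvLeft a m k) (pvLeft a m k) (k + 1)
        (Nat.le_refl _) (by omega) (by omega)
        (fun t ht1 ht2 => absurd ht2 (Nat.not_lt.mpr ht1))
        (by
          unfold pvCond
          rintro (hg | ⟨hg1, _⟩) <;> omega)]
      show ((if pvCntW a m (pvLeft a m k) (k + 1) = 1 ∧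
            PySem.List.pyGetD a (((pvMQ a (pvLeft a m k) (k + 1)).map Int.ofNat).headD 0) 0 = m
          then max (pvMaxw a m k) (pvS a (k + 1) - pvS a (pvLeft a m k)) else pvMaxw a m k),
        ((pvLeft a m k : Int)), pvCntW a m (pvLeft a m k) (k + 1),
        pvS a (k + 1) - pvS a (pvLeft a m k),
        (pvMQ a (pvLeft a m k) (k + 1)).map Int.ofNat) = _
      rw [if_neg (by rw [hw0]; rintro ⟨hh, _⟩; exact absurd hh (by norm_num))]
      have eB : pvBest a m (k + 1) = pvBest a m k := by
        (conv_lhs => unfold pvBest); rw [if_pos hv, if_neg (by rw [hop]; exact Bool.false_ne_true)]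
      have eM1 : pvMaxw a m (k + 1) = pvMaxw a m k := by
        simp [pvMaxw, eO, eB, hop]
      have ecn : pvCnt a m (k + 1) = pvCntW a m (pvLeft a m k) (k + 1) := by
        rw [hw0]; simp [pvCnt, eO]
      rw [eM1, ecn, eL]
  · -- a[k] = m
    have hnlt : ¬(a.getD k 0 < m) := by omega
    have eO : pvOpn a m (k + 1) = true := by (conv_lhs => unfold pvOpn); rw [if_neg hnlt, if_pos hv]
    rw [if_pos hv, ecur]
    cases hop : pvOpn a m k with
    | true =>
      obtain ⟨g1, g2, g3, g4, g5, g6, g7⟩ := ht hop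
      have eL : pvLeft a m (k + 1) = pvLastM a m k + 1 := by
        (conv_lhs => unfold pvLeft); rw [if_neg hnlt, if_pos hv, if_pos hop]
      have hcA : pvCntW a m (pvLeft a m k) (pvLastM a m k + 1) = 1 := by
        refine pvCntW_one a m _ _ (pvLastM a m k) g1 (by omega) g3 ?_
        intro j hj1 hj2 hm'
        exact g5 j hj1 (by omega) hm'
      have hc2 : pvCntW a m (pvLastM a m k + 1) (k + 1) = 1 := by
        refine pvCntW_one a m _ _ k (by omega) (by omega) hv ?_
        intro j hj1 hj2 hm'
        rcases Nat.lt_or_ge j k with h3 | h3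
        · exfalso; have := g5 j (by omega) h3 hm'; omega
        · omega
      have hw2 : pvCntW a m (pvLeft a m k) (k + 1) = 2 := by
        have := pvCntW_split a m (pvLeft a m k) (pvLastM a m k + 1) (k + 1) (by omega) (by omega)
        omega
      have ecnt : pvCnt a m k + 1 = pvCntW a m (pvLeft a m k) (k + 1) := by
        rw [hw2]; simp [pvCnt, hop]
      rw [ecnt]
      rw [pvShrink_spec a m (k + 2) (pvLeft a m k) (pvLastM a m k + 1) (k + 1)
        (by omega) (by omega) (by omega)
        (fun t ht1 ht2 => by
          unfold pvCond
          left
          have hta : pvCntW a m t (pvLastM a m k + 1) = 1 := by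
            refine pvCntW_one a m _ _ (pvLastM a m k) (by omega) (by omega) g3 ?_
            intro j hj1 hj2 hm'
            exact g5 j (by omega) (by omega) hm'
          have := pvCntW_split a m t (pvLastM a m k + 1) (k + 1) (by omega) (by omega)
          omega)
        (by
          unfold pvCond
          rintro (hg | ⟨_, j, hj1, hj2, hj3⟩)
          · omega
          · rcases Nat.lt_or_ge j k with h3 | h3
            · have := g4 j (by omega) h3; omega
            · have hjk : j = k := by omega
              subst hjk; omega)]
      show ((if pvCntW a m (pvLastM a m k + 1) (k + 1) = 1 ∧
            PySem.List.pyGetD a (((pvMQ a (pvLastM a m k + 1) (k + 1)).map Int.ofNat).headD 0) 0 = m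
          then max (pvMaxw a m k) (pvS a (k + 1) - pvS a (pvLastM a m k + 1)) else pvMaxw a m k),
        ((pvLastM a m k + 1 : Nat) : Int), pvCntW a m (pvLastM a m k + 1) (k + 1),
        pvS a (k + 1) - pvS a (pvLastM a m k + 1),
        (pvMQ a (pvLastM a m k + 1) (k + 1)).map Int.ofNat) = _
      have hhead : PySem.List.pyGetD a (((pvMQ a (pvLastM a m k + 1) (k + 1)).map Int.ofNat).headD 0) 0 = m := by
        refine pvHead_m a m _ _ (by omega) ?_ k (by omega) (by omega) hv
        intro j hj1 hj2
        rcases Nat.lt_or_ge j k with h3 | h3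
        · exact g4 j (by omega) h3
        · have hjk : j = k := by omega
          subst hjk; omega
      rw [if_pos ⟨hc2, hhead⟩]
      have eB : pvBest a m (k + 1) = max (pvBest a m k) (pvMP a m k - pvLpre a m k) := by
        (conv_lhs => unfold pvBest); rw [if_neg hnlt, if_pos hv, if_pos hop, pvMaxIte]
      have eMPs : pvMP a m (k + 1) = pvS a (k + 1) := by
        (conv_lhs => unfold pvMP); rw [if_neg hnlt, if_pos hv]
      have eLp : pvLpre a m (k + 1) = pvPA a m k := by
        (conv_lhs => unfold pvLpre); rw [if_pos hv, if_pos hop]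
      have eM1 : pvMaxw a m (k + 1) = max (pvMaxw a m k) (pvS a (k + 1) - pvS a (pvLastM a m k + 1)) := by
        simp [pvMaxw, eO, eB, eMPs, eLp, g7, hop]
      have ecn : pvCnt a m (k + 1) = pvCntW a m (pvLastM a m k + 1) (k + 1) := by
        rw [hc2]; simp [pvCnt, eO]
      rw [eM1, ecn, eL]
    | false =>
      obtain ⟨hnom, hrs⟩ := hf hop
      have hRk := pvRunS_le a m k
      have eL : pvLeft a m (k + 1) = pvRunS a m k := by
        (conv_lhs => unfold pvLeft); rw [if_neg hnlt, if_pos hv, if_neg (by rw [hop]; exact Bool.false_ne_true)]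
      have hw1 : pvCntW a m (pvLeft a m k) (k + 1) = 1 := by
        refine pvCntW_one a m _ _ k (by omega) (by omega) hv ?_
        intro j hj1 hj2 hm'
        rcases Nat.lt_or_ge j k with h3 | h3
        · exact absurd hm' (hnom j hj1 h3)
        · omega
      have hcR : pvCntW a m (pvRunS a m k) (k + 1) = 1 := by
        refine pvCntW_one a m _ _ k (by omega) (by omega) hv ?_
        intro j hj1 hj2 hm'
        rcases Nat.lt_or_ge j k with h3 | h3
        · exact absurd hm' (pvOpn_no_m a m k hop j hj1 h3)
        · omega
      have ecnt : pvCnt a m k + 1 = pvCntW a m (pvLeft a m k) (k + 1) := by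
        rw [hw1]; simp [pvCnt, hop]
      rw [ecnt]
      rw [pvShrink_spec a m (k + 2) (pvLeft a m k) (pvRunS a m k) (k + 1)
        hrs (by omega) (by omega)
        (fun t ht1 ht2 => by
          unfold pvCond
          refine Or.inr ⟨?_, pvRunS a m k - 1, by omega, by omega, ?_⟩
          · refine pvCntW_one a m _ _ k (by omega) (by omega) hv ?_
            intro j hj1 hj2 hm'
            rcases Nat.lt_or_ge j k with h3 | h3
            · exact absurd hm' (hnom j (by omega) h3)
            · omega
          · have := pvRunS_bar a m k (by omega)
            exact this)
        (by
          unfold pvCond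
          rintro (hg | ⟨_, j, hj1, hj2, hj3⟩)
          · omega
          · rcases Nat.lt_or_ge j k with h3 | h3
            · have := pvRunS_no_bar a m k j hj1 h3; omega
            · have hjk : j = k := by omega
              subst hjk; omega)]
      show ((if pvCntW a m (pvRunS a m k) (k + 1) = 1 ∧
            PySem.List.pyGetD a (((pvMQ a (pvRunS a m k) (k + 1)).map Int.ofNat).headD 0) 0 = m
          then max (pvMaxw a m k) (pvS a (k + 1) - pvS a (pvRunS a m k)) else pvMaxw a m k),
        ((pvRunS a m k : Nat) : Int), pvCntW a m (pvRunS a m k) (k + 1),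
        pvS a (k + 1) - pvS a (pvRunS a m k),
        (pvMQ a (pvRunS a m k) (k + 1)).map Int.ofNat) = _
      have hhead : PySem.List.pyGetD a (((pvMQ a (pvRunS a m k) (k + 1)).map Int.ofNat).headD 0) 0 = m := by
        refine pvHead_m a m _ _ (by omega) ?_ k (by omega) (by omega) hv
        intro j hj1 hj2
        rcases Nat.lt_or_ge j k with h3 | h3
        · exact pvRunS_no_bar a m k j hj1 h3
        · have hjk : j = k := by omega
          subst hjk; omega
      rw [if_pos ⟨hcR, hhead⟩]
      have eB : pvBest a m (k + 1) = pvBest a m k := by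
        (conv_lhs => unfold pvBest); rw [if_neg hnlt, if_pos hv, if_neg (by rw [hop]; exact Bool.false_ne_true)]
      have eMPs : pvMP a m (k + 1) = pvS a (k + 1) := by
        (conv_lhs => unfold pvMP); rw [if_neg hnlt, if_pos hv]
      have eLp : pvLpre a m (k + 1) = pvS a (pvRunS a m k) := by
        (conv_lhs => unfold pvLpre); rw [if_pos hv, if_neg (by rw [hop]; exact Bool.false_ne_true)]
      have eM1 : pvMaxw a m (k + 1) = max (pvMaxw a m k) (pvS a (k + 1) - pvS a (pvRunS a m k)) := by
        simp [pvMaxw, eO, eB, eMPs, eLp, hop]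
      have ecn : pvCnt a m (k + 1) = pvCntW a m (pvRunS a m k) (k + 1) := by
        rw [hcR]; simp [pvCnt, eO]
      rw [eM1, ecn, eL]
  · -- a[k] > m
    have hnlt : ¬(a.getD k 0 < m) := by omega
    have hnm : a.getD k 0 ≠ m := by omega
    have eO : pvOpn a m (k + 1) = pvOpn a m k := by
      (conv_lhs => unfold pvOpn); rw [if_neg hnlt, if_neg hnm]
    have eL : pvLeft a m (k + 1) = pvLeft a m k := by
      (conv_lhs => unfold pvLeft); rw [if_neg hnlt, if_neg hnm]
    rw [if_neg hnm, ecur]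
    cases hop : pvOpn a m k with
    | true =>
      obtain ⟨g1, g2, g3, g4, g5, g6, g7⟩ := ht hop
      have hw1 : pvCntW a m (pvLeft a m k) (k + 1) = 1 := by
        refine pvCntW_one a m _ _ (pvLastM a m k) g1 (by omega) g3 ?_
        intro j hj1 hj2 hm'
        rcases Nat.lt_or_ge j k with h3 | h3
        · exact g5 j hj1 h3 hm'
        · exfalso; have hjk : j = k := by omega
          subst hjk; exact hnm hm'
      have ecnt : pvCnt a m k = pvCntW a m (pvLeft a m k) (k + 1) := by
        rw [hw1]; simp [pvCnt, hop]
      rw [ecnt]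
      rw [pvShrink_spec a m (k + 2) (pvLeft a m k) (pvLeft a m k) (k + 1)
        (Nat.le_refl _) (by omega) (by omega)
        (fun t ht1 ht2 => absurd ht2 (Nat.not_lt.mpr ht1))
        (by
          unfold pvCond
          rintro (hg | ⟨_, j, hj1, hj2, hj3⟩)
          · omega
          · rcases Nat.lt_or_ge j k with h3 | h3
            · have := g4 j hj1 h3; omega
            · have hjk : j = k := by omega
              subst hjk; omega)]
      show ((if pvCntW a m (pvLeft a m k) (k + 1) = 1 ∧
            PySem.List.pyGetD a (((pvMQ a (pvLeft a m k) (k + 1)).map Int.ofNat).headD 0) 0 = m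
          then max (pvMaxw a m k) (pvS a (k + 1) - pvS a (pvLeft a m k)) else pvMaxw a m k),
        ((pvLeft a m k : Int)), pvCntW a m (pvLeft a m k) (k + 1),
        pvS a (k + 1) - pvS a (pvLeft a m k),
        (pvMQ a (pvLeft a m k) (k + 1)).map Int.ofNat) = _
      have hhead : PySem.List.pyGetD a (((pvMQ a (pvLeft a m k) (k + 1)).map Int.ofNat).headD 0) 0 = m := by
        refine pvHead_m a m _ _ (by omega) ?_ (pvLastM a m k) g1 (by omega) g3
        intro j hj1 hj2
        rcases Nat.lt_or_ge j k with h3 | h3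
        · exact g4 j hj1 h3
        · have hjk : j = k := by omega
          subst hjk; omega
      rw [if_pos ⟨hw1, hhead⟩]
      have eB : pvBest a m (k + 1) = pvBest a m k := by
        (conv_lhs => unfold pvBest); rw [if_neg hnlt, if_neg hnm]
      have eLp : pvLpre a m (k + 1) = pvLpre a m k := by
        (conv_lhs => unfold pvLpre); rw [if_neg hnm]
      have eMP : pvMP a m (k + 1) = max (pvMP a m k) (pvS a (k + 1)) := by
        (conv_lhs => unfold pvMP)
        rw [if_neg hnlt, if_neg hnm, hop]
        simp only [true_and]
        exact pvMaxIte _ _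
      have eM1 : pvMaxw a m (k + 1) = max (pvMaxw a m k) (pvS a (k + 1) - pvS a (pvLeft a m k)) := by
        have hmx : ∀ A B C D : Int, max A (max B C - D) = max (max A (B - D)) (C - D) := by
          intro A B C D
          rw [← max_sub_sub_right, ← max_assoc]
        simp only [pvMaxw, eO, hop, eB, eMP, eLp, g6]
        exact hmx _ _ _ _
      have ecn : pvCnt a m (k + 1) = pvCntW a m (pvLeft a m k) (k + 1) := by
        rw [hw1]; simp [pvCnt, eO, hop]
      rw [eM1, ecn, eL]
    | false =>
      obtain ⟨hnom, hrs⟩ := hf hop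
      have hw0 : pvCntW a m (pvLeft a m k) (k + 1) = 0 := by
        refine pvCntW_zero a m _ _ ?_
        intro j hj1 hj2 hm'
        rcases Nat.lt_or_ge j k with h3 | h3
        · exact hnom j hj1 h3 hm'
        · have hjk : j = k := by omega
          subst hjk; exact hnm hm'
      have ecnt : pvCnt a m k = pvCntW a m (pvLeft a m k) (k + 1) := by
        rw [hw0]; simp [pvCnt, hop]
      rw [ecnt]
      rw [pvShrink_spec a m (k + 2) (pvLeft a m k) (pvLeft a m k) (k + 1)
        (Nat.le_refl _) (by omega) (by omega)
        (fun t ht1 ht2 => absurd ht2 (Nat.not_lt.mpr ht1))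
        (by
          unfold pvCond
          rintro (hg | ⟨hg1, _⟩) <;> omega)]
      show ((if pvCntW a m (pvLeft a m k) (k + 1) = 1 ∧
            PySem.List.pyGetD a (((pvMQ a (pvLeft a m k) (k + 1)).map Int.ofNat).headD 0) 0 = m
          then max (pvMaxw a m k) (pvS a (k + 1) - pvS a (pvLeft a m k)) else pvMaxw a m k),
        ((pvLeft a m k : Int)), pvCntW a m (pvLeft a m k) (k + 1),
        pvS a (k + 1) - pvS a (pvLeft a m k),
        (pvMQ a (pvLeft a m k) (k + 1)).map Int.ofNat) = _
      rw [if_neg (by rw [hw0]; rintro ⟨hh, _⟩; exact absurd hh (by norm_num))]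
      have eB : pvBest a m (k + 1) = pvBest a m k := by
        (conv_lhs => unfold pvBest); rw [if_neg hnlt, if_neg hnm]
      have eM1 : pvMaxw a m (k + 1) = pvMaxw a m k := by
        simp [pvMaxw, eO, eB, hop]
      have ecn : pvCnt a m (k + 1) = pvCntW a m (pvLeft a m k) (k + 1) := by
        rw [hw0]; simp [pvCnt, eO, hop]
      rw [eM1, ecn, eL]
theorem pvStepB_eq (a : List Int) (m : Int) (k : Nat) :
    pvStepB a m (pvBState a m k) (k : Int) = pvBState a m (k + 1) := by
  have hS := pvS_succ a k
  unfold pvStepB pvBState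
  rw [PySem.List.pyGetD_natCast]
  show ((if a.getD k 0 < m then
        ((if pvOpn a m k then (if pvMP a m k - pvLpre a m k > pvBest a m k then pvMP a m k - pvLpre a m k else pvBest a m k) else pvBest a m k),
         pvS a k + a.getD k 0, pvS a k + a.getD k 0, false, pvLpre a m k, pvMP a m k, pvPA a m k)
      else if a.getD k 0 = m then
        (if pvOpn a m k then
          ((if pvMP a m k - pvLpre a m k > pvBest a m k then pvMP a m k - pvLpre a m k else pvBest a m k),
           pvS a k + a.getD k 0, pvS a (pvRunS a m k), true, pvPA a m k, pvS a k + a.getD k 0, pvS a k + a.getD k 0)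
        else
          (pvBest a m k, pvS a k + a.getD k 0, pvS a (pvRunS a m k), true, pvS a (pvRunS a m k), pvS a k + a.getD k 0, pvS a k + a.getD k 0))
      else
        (pvBest a m k, pvS a k + a.getD k 0, pvS a (pvRunS a m k), pvOpn a m k, pvLpre a m k,
         (if pvOpn a m k ∧ pvS a k + a.getD k 0 > pvMP a m k then pvS a k + a.getD k 0 else pvMP a m k), pvPA a m k))
     = (pvBest a m (k + 1), pvS a (k + 1), pvS a (pvRunS a m (k + 1)), pvOpn a m (k + 1), pvLpre a m (k + 1), pvMP a m (k + 1), pvPA a m (k + 1)))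
  rcases lt_trichotomy (a.getD k 0) m with hv | hv | hv
  · have hnm : a.getD k 0 ≠ m := by omega
    have eO : pvOpn a m (k + 1) = false := by (conv_lhs => unfold pvOpn); rw [if_pos hv]
    have eR : pvRunS a m (k + 1) = k + 1 := by (conv_lhs => unfold pvRunS); rw [if_pos hv]
    have eB : pvBest a m (k + 1) = (if pvOpn a m k then
        (if pvMP a m k - pvLpre a m k > pvBest a m k then pvMP a m k - pvLpre a m k else pvBest a m k)
        else pvBest a m k) := by
      (conv_lhs => unfold pvBest); rw [if_pos hv]
    have eLp : pvLpre a m (k + 1) = pvLpre a m k := by (conv_lhs => unfold pvLpre); rw [if_neg hnm]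
    have eMP : pvMP a m (k + 1) = pvMP a m k := by (conv_lhs => unfold pvMP); rw [if_pos hv]
    have ePA : pvPA a m (k + 1) = pvPA a m k := by (conv_lhs => unfold pvPA); rw [if_neg hnm]
    rw [if_pos hv, eB, eO, eR, eLp, eMP, ePA, hS]
  · have hnlt : ¬(a.getD k 0 < m) := by omega
    have eO : pvOpn a m (k + 1) = true := by (conv_lhs => unfold pvOpn); rw [if_neg hnlt, if_pos hv]
    have eR : pvRunS a m (k + 1) = pvRunS a m k := by (conv_lhs => unfold pvRunS); rw [if_neg hnlt]
    have ePA : pvPA a m (k + 1) = pvS a (k + 1) := by (conv_lhs => unfold pvPA); rw [if_pos hv]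
    have eMP : pvMP a m (k + 1) = pvS a (k + 1) := by (conv_lhs => unfold pvMP); rw [if_neg hnlt, if_pos hv]
    rw [if_neg hnlt, if_pos hv]
    cases hop : pvOpn a m k with
    | true =>
      have eB : pvBest a m (k + 1) = (if pvMP a m k - pvLpre a m k > pvBest a m k then
          pvMP a m k - pvLpre a m k else pvBest a m k) := by
        (conv_lhs => unfold pvBest); rw [if_neg hnlt, if_pos hv, if_pos hop]
      have eLp : pvLpre a m (k + 1) = pvPA a m k := by
        (conv_lhs => unfold pvLpre); rw [if_pos hv, if_pos hop]
      rw [if_pos rfl, eB, eO, eR, eLp, eMP, ePA, hS]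
    | false =>
      have eB : pvBest a m (k + 1) = pvBest a m k := by
        (conv_lhs => unfold pvBest); rw [if_neg hnlt, if_pos hv, if_neg (by rw [hop]; exact Bool.false_ne_true)]
      have eLp : pvLpre a m (k + 1) = pvS a (pvRunS a m k) := by
        (conv_lhs => unfold pvLpre); rw [if_pos hv, if_neg (by rw [hop]; exact Bool.false_ne_true)]
      rw [if_neg Bool.false_ne_true, eB, eO, eR, eLp, eMP, ePA, hS]
  · have hnlt : ¬(a.getD k 0 < m) := by omega
    have hnm : a.getD k 0 ≠ m := by omega
    have eO : pvOpn a m (k + 1) = pvOpn a m k := by (conv_lhs => unfold pvOpn); rw [if_neg hnlt, if_neg hnm]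
    have eR : pvRunS a m (k + 1) = pvRunS a m k := by (conv_lhs => unfold pvRunS); rw [if_neg hnlt]
    have eB : pvBest a m (k + 1) = pvBest a m k := by
      (conv_lhs => unfold pvBest); rw [if_neg hnlt, if_neg hnm]
    have eLp : pvLpre a m (k + 1) = pvLpre a m k := by (conv_lhs => unfold pvLpre); rw [if_neg hnm]
    have eMP : pvMP a m (k + 1) = (if pvOpn a m k ∧ pvS a (k + 1) > pvMP a m k then pvS a (k + 1)
        else pvMP a m k) := by
      (conv_lhs => unfold pvMP); rw [if_neg hnlt, if_neg hnm]
    have ePA : pvPA a m (k + 1) = pvPA a m k := by (conv_lhs => unfold pvPA); rw [if_neg hnm]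
    rw [if_neg hnlt, if_neg hv.ne', eB, eO, eR, eLp, eMP, ePA, hS]

theorem pvFoldA (a : List Int) (m : Int) (K : Nat) :
    (PySem.List.pyRange 0 (K : Int) 1).foldl (pvStepA a m) (-1, 0, 0, 0, []) = pvAState a m K := by
  induction K with
  | zero =>
    rw [PySem.List.pyRange_one_eq_nil (by omega)]
    rfl
  | succ K ih =>
    have : ((K + 1 : Nat) : Int) = (K : Int) + 1 := by push_cast; ring
    rw [this, PySem.List.pyRange_one_succ_right (by omega), List.foldl_append, ih]
    exact pvStepA_eq a m K
theorem pvFoldB (a : List Int) (m : Int) (K : Nat) :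
    (PySem.List.pyRange 0 (K : Int) 1).foldl (pvStepB a m) (-1, 0, 0, false, 0, 0, 0) = pvBState a m K := by
  induction K with
  | zero =>
    rw [PySem.List.pyRange_one_eq_nil (by omega)]
    rfl
  | succ K ih =>
    have : ((K + 1 : Nat) : Int) = (K : Int) + 1 := by push_cast; ring
    rw [this, PySem.List.pyRange_one_succ_right (by omega), List.foldl_append, ih]
    exact pvStepB_eq a m K

-- ===== VERDICT (by name: the statement is the Claim_ definition above) =====
theorem max_weight_subarray_spec : Claim_equal_max_weight_subarray := by
  intro n m array _ _
  unfold Spec_max_weight_subarray max_weight_subarray max_weight_subarray_alt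
  by_cases hn : n ≤ 0
  · rw [PySem.List.pyRange_one_eq_nil (by omega)]
    simp
  · have hK : n = ((n.toNat : Nat) : Int) := by omega
    rw [hK, pvFoldA, pvFoldB, pvAState, pvBState]
    unfold pvMaxw pvCnt
    cases hop : pvOpn array m n.toNat <;> simp <;> omega
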